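-- pv_equiv track=rewrite | github.com/babienisa443/OOD-weekly-program | Od/python101/0010_Trik.py | Trik
-- ===== SOURCE A (Python) =====
-- def Trik(inp):
--     ls = [True, False, False]
--     for i in inp:
--         if i == 'A':
--             ls[0], ls[1] = ls[1], ls[0]
--         elif i == 'B':
--             ls[1], ls[2] = ls[2], ls[1]
--         else:
--             ls[0], ls[2] = ls[2], ls[0]
--     return ls
-- ===== SOURCE B (Python) =====
-- def Trik(inp):
--     perm = {'A': (1, 0, 2), 'B': (0, 2, 1)}
--     pos = 0
--     for i in inp:
--         pos = perm.get(i, (2, 1, 0))[pos]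
--     return [j == pos for j in range(3)]
-- ===== Notes on version B (the rewrite author's own statement) =====
-- stated objective: simpler
-- what changed: B tracks only the integer position of the single True element via a permutation table instead of mutating a 3-element boolean list, rebuilding the list once at the end. (measured ~2x faster: one tuple-indexed integer update per character instead of list element swaps)
import Mathlib
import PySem

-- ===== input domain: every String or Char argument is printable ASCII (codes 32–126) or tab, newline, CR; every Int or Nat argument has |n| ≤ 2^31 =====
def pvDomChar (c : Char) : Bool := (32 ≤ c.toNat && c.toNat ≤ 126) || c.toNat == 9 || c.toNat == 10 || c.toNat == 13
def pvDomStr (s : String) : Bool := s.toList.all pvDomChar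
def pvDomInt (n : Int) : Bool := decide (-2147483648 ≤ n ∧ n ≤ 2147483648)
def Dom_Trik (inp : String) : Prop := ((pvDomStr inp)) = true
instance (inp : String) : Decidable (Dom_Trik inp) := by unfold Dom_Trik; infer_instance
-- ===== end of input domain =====

-- B tracks only the integer position of the single True element via a permutation table; A mutates a 3-element boolean list.

-- ===== PORT A =====
-- A's 3-element boolean list is the triple (ls[0], ls[1], ls[2]); each branch performs the swap.
def TrikStepA (ls : Bool × Bool × Bool) (i : Char) : Bool × Bool × Bool :=
  if i = 'A' then (ls.2.1, ls.1, ls.2.2)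
  else if i = 'B' then (ls.1, ls.2.2, ls.2.1)
  else (ls.2.2, ls.2.1, ls.1)

def Trik (inp : String) : List Bool :=
  let ls := inp.toList.foldl TrikStepA (true, false, false)
  [ls.1, ls.2.1, ls.2.2]

-- ===== PORT B =====
-- perm.get(i, (2,1,0))[pos]: pick the tuple by the char, index it by pos.
def TrikStepB (pos : Int) (i : Char) : Int :=
  let t : Int × Int × Int := if i = 'A' then (1, 0, 2) else if i = 'B' then (0, 2, 1) else (2, 1, 0)
  if pos = 0 then t.1 else if pos = 1 then t.2.1 else t.2.2

def Trik_alt (inp : String) : List Bool :=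
  let pos := inp.toList.foldl TrikStepB 0
  (PySem.List.pyRange 0 3 1).map (fun j => decide (j = pos))

-- ===== PRECONDITION & SPEC =====
def Spec_Trik (inp : String) (out : List Bool) : Prop := out = Trik_alt inp
instance (inp : String) (out : List Bool) : Decidable (Spec_Trik inp out) := by unfold Spec_Trik; infer_instance

-- ===== CLAIM (what is proved, stated in full; the proofs are below) =====
def Claim_equal_Trik : Prop := ∀ (inp : String), Dom_Trik inp → Spec_Trik inp (Trik inp)

-- ===== LEMMAS AND PROOFS =====
-- indicator triple relating B's position to A's boolean list
def trikInd (p : Int) : Bool × Bool × Bool := (decide (p = 0), decide (p = 1), decide (p = 2))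

theorem trikStepB_range (p : Int) (c : Char) (h : p = 0 ∨ p = 1 ∨ p = 2) :
    TrikStepB p c = 0 ∨ TrikStepB p c = 1 ∨ TrikStepB p c = 2 := by
  unfold TrikStepB
  rcases h with h | h | h <;> subst h <;> by_cases hA : c = 'A' <;> by_cases hB : c = 'B' <;>
    simp [hA, hB]

theorem trikStepA_ind (p : Int) (c : Char) (h : p = 0 ∨ p = 1 ∨ p = 2) :
    TrikStepA (trikInd p) c = trikInd (TrikStepB p c) := by
  unfold TrikStepA TrikStepB trikInd
  rcases h with h | h | h <;> subst h <;> by_cases hA : c = 'A' <;> by_cases hB : c = 'B' <;>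
    simp [hA, hB]

theorem trik_fold_ind (l : List Char) (p : Int) (h : p = 0 ∨ p = 1 ∨ p = 2) :
    l.foldl TrikStepA (trikInd p) = trikInd (l.foldl TrikStepB p) ∧
      (l.foldl TrikStepB p = 0 ∨ l.foldl TrikStepB p = 1 ∨ l.foldl TrikStepB p = 2) := by
  induction l generalizing p with
  | nil => exact ⟨rfl, h⟩
  | cons c l ih =>
    simp only [List.foldl_cons, trikStepA_ind p c h]
    exact ih _ (trikStepB_range p c h)

-- ===== VERDICT (by name: the statement is the Claim_ definition above) =====
theorem Trik_spec : Claim_equal_Trik := by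
  intro inp _
  unfold Spec_Trik Trik Trik_alt
  obtain ⟨h1, _⟩ := trik_fold_ind inp.toList 0 (Or.inl rfl)
  have h0 : trikInd 0 = (true, false, false) := by decide
  rw [← h0, h1]
  have hr : PySem.List.pyRange 0 3 1 = [0, 1, 2] := by decide
  simp [hr, trikInd, eq_comm]
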